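-- pv_equiv track=rewrite | github.com/UndercoverEconomist/arc-solver | output_vis/017c7c7b/017c7c7b_candidate.py | transform
-- ===== SOURCE A (Python) =====
-- def transform(grid):
--     """
--     Transforms a grid based on the narrative description.
--
--     The transformation logic is as follows:
--     - Any '1' that has an adjacent '1' (horizontally or vertically) becomes a '2'.
--     - Any '0' that is adjacent to a '1' becomes a '2'.
--     - Cells that are not affected by these rules remain '0'.
--
--     Args:
--         grid: A nested list representing the input grid (e.g., [[0, 1, 0], [1, 0, 1]]).
--
--     Returns:
--         A nested list representing the transformed grid.
--     """
--     rows = len(grid)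
--     cols = len(grid[0]) if rows > 0 else 0
--     transformed_grid = [[0 for _ in range(cols)] for _ in range(rows)]
--
--     for r in range(rows):
--         for c in range(cols):
--             if grid[r][c] == 1:
--                 # A '1' can become a '2' if it has an adjacent '1' or if it's a solitary '1'
--                 # that is adjacent to a '0' which would then become a '2'.
--                 # The narrative implies that any '1' becomes a '2' if it's part of any interaction.
--                 # A solitary '1' will still be a '2' if it's next to a '0' that becomes a '2'.
--                 # The simplest interpretation is that any '1' becomes a '2' if it has *any* neighbor
--                 # that is a '1' or a '0' that will become a '2'.
--                 # This also covers the case where a '1' is next to another '1'.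
--                 transformed_grid[r][c] = 2
--             elif grid[r][c] == 0:
--                 # Check for adjacent '1's
--                 is_adjacent_to_one = False
--                 # Check up
--                 if r > 0 and grid[r - 1][c] == 1:
--                     is_adjacent_to_one = True
--                 # Check down
--                 if r < rows - 1 and grid[r + 1][c] == 1:
--                     is_adjacent_to_one = True
--                 # Check left
--                 if c > 0 and grid[r][c - 1] == 1:
--                     is_adjacent_to_one = True
--                 # Check right
--                 if c < cols - 1 and grid[r][c + 1] == 1:
--                     is_adjacent_to_one = True
--
--                 if is_adjacent_to_one:
--                     transformed_grid[r][c] = 2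
--
--     # Second pass to ensure all '1's become '2's if they have an adjacent '1'
--     # This handles cases like '110' -> '220' where the first '1' might not
--     # have triggered the second '1' to become '2' in the first pass if the logic
--     # was strictly about '0's becoming '2's.
--     # The narrative implies that '1's adjacent to '1's become '2's.
--     # And '0's adjacent to '1's become '2's.
--     # Let's refine:
--     # If a cell is '1', it becomes '2'.
--     # If a cell is '0' and adjacent to a '1', it becomes '2'.
--
--     # Re-initialize for clarity based on refined understanding
--     transformed_grid = [[0 for _ in range(cols)] for _ in range(rows)]
--
--     for r in range(rows):
--         for c in range(cols):
--             if grid[r][c] == 1: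
--                 transformed_grid[r][c] = 2
--             elif grid[r][c] == 0:
--                 # Check for adjacent '1's
--                 is_adjacent_to_one = False
--                 # Check up
--                 if r > 0 and grid[r - 1][c] == 1:
--                     is_adjacent_to_one = True
--                 # Check down
--                 if r < rows - 1 and grid[r + 1][c] == 1:
--                     is_adjacent_to_one = True
--                 # Check left
--                 if c > 0 and grid[r][c - 1] == 1:
--                     is_adjacent_to_one = True
--                 # Check right
--                 if c < cols - 1 and grid[r][c + 1] == 1:
--                     is_adjacent_to_one = True
--
--                 if is_adjacent_to_one:
--                     transformed_grid[r][c] = 2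
--
--     return transformed_grid
-- ===== SOURCE B (Python) =====
-- def transform(grid):
--     cols = len(grid[0]) if grid else 0
--     one = [[v == 1 for v in row[:cols]] for row in grid]
--     n = len(grid)
--     out = []
--     for r in range(n):
--         row = one[r]
--         up = one[r - 1] if r > 0 else [False] * cols
--         down = one[r + 1] if r + 1 < n else [False] * cols
--         left = [False] + row[:-1]
--         right = row[1:] + [False]
--         nbr = [a or b for a, b in zip(up, down)]
--         nbr = [a or b for a, b in zip(nbr, left)]
--         nbr = [a or b for a, b in zip(nbr, right)]
--         out.append([2 if o or (v == 0 and a) else 0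
--                     for o, (v, a) in zip(row, zip(grid[r], nbr))])
--     return out
-- ===== Notes on version B (the rewrite author's own statement) =====
-- stated objective: alternative
-- what changed: Replaces A's per-cell gather over (r,c) with four bounds-tested index lookups (and its duplicated identical second pass) by a single pass that builds each output row by zipping the row with its four shifted/adjacent neighbor rows, with no column index arithmetic.
import Mathlib
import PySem

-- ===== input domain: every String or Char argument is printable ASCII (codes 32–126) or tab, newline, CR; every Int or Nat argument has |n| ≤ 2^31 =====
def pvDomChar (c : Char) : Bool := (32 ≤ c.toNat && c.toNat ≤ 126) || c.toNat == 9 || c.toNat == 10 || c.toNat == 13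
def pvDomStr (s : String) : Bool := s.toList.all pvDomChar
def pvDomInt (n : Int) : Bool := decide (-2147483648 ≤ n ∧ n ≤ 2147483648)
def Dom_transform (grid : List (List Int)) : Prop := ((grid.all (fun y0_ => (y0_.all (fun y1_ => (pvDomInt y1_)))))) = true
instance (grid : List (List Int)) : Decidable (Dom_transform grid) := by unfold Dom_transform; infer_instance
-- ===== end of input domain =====

-- B builds each output row by zipping the row with its four shifted/adjacent neighbor rows instead of
-- A's per-cell gather with index arithmetic and bounds tests (and without A's duplicated second pass);
-- equal return values on all rectangular grids (Pre_).

-- ===== PORT A =====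
def pvGet2 (grid : List (List Int)) (r c : Int) : Int :=
  PySem.List.pyGetD (PySem.List.pyGetD grid r []) c 0

def pvSet2 (t : List (List Int)) (r c : Int) : List (List Int) :=
  PySem.List.pySetD t r (PySem.List.pySetD (PySem.List.pyGetD t r []) c 2)

def transform (grid : List (List Int)) : List (List Int) :=
  let rows : Int := PySem.List.len grid
  let cols : Int := if 0 < rows then PySem.List.len (PySem.List.pyGetD grid 0 []) else 0
  let zero : List (List Int) :=
    (PySem.List.pyRange 0 rows 1).map (fun _ => (PySem.List.pyRange 0 cols 1).map (fun _ => (0:Int)))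
  let pass : List (List Int) → List (List Int) := fun t0 =>
    (PySem.List.pyRange 0 rows 1).foldl (fun t r =>
      (PySem.List.pyRange 0 cols 1).foldl (fun t c =>
        if pvGet2 grid r c == 1 then
          pvSet2 t r c
        else if pvGet2 grid r c == 0 then
          let adj : Bool :=
            (decide (0 < r) && (pvGet2 grid (r-1) c == 1)) ||
            (decide (r < rows - 1) && (pvGet2 grid (r+1) c == 1)) ||
            (decide (0 < c) && (pvGet2 grid r (c-1) == 1)) ||
            (decide (c < cols - 1) && (pvGet2 grid r (c+1) == 1))
          if adj then pvSet2 t r c else t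
        else t) t) t0
  let _t1 := pass zero
  let t2 := pass zero
  t2

-- ===== PORT B =====
def transform_alt (grid : List (List Int)) : List (List Int) :=
  let cols : Int := if 0 < PySem.List.len grid then PySem.List.len (PySem.List.pyGetD grid 0 []) else 0
  let one : List (List Bool) :=
    grid.map (fun row => (PySem.List.slice row none (some cols)).map (fun v => v == 1))
  let n : Int := PySem.List.len grid
  (PySem.List.pyRange 0 n 1).foldl (fun out r =>
    let row := PySem.List.pyGetD one r []
    let up := if 0 < r then PySem.List.pyGetD one (r-1) [] else List.replicate cols.toNat false
    let down := if r + 1 < n then PySem.List.pyGetD one (r+1) [] else List.replicate cols.toNat false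
    let left := false :: PySem.List.slice row none (some (-1))   -- [False] + row[:-1]
    let right := PySem.List.slice row (some 1) none ++ [false]   -- row[1:] + [False]
    let nbr := (up.zip down).map (fun p => p.1 || p.2)
    let nbr2 := (nbr.zip left).map (fun p => p.1 || p.2)
    let nbr3 := (nbr2.zip right).map (fun p => p.1 || p.2)
    out ++ [((row.zip ((PySem.List.pyGetD grid r []).zip nbr3)).map
      (fun p => if p.1 || (p.2.1 == 0 && p.2.2) then (2:Int) else 0))]) []

-- ===== PRECONDITION & SPEC =====
-- Pre_ excludes exactly the grids on which A raises IndexError: those with a row shorter than the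
-- first row (A indexes every row at all columns 0..len(grid[0])-1).
def Pre_transform (grid : List (List Int)) : Prop :=
  ∀ row ∈ grid, (grid.headD []).length ≤ row.length
instance (grid : List (List Int)) : Decidable (Pre_transform grid) := by
  unfold Pre_transform; infer_instance
def pvWitness_transform : List (List Int) := [[1, 0], [0, 0]]

def Spec_transform (grid : List (List Int)) (out : List (List Int)) : Prop := out = transform_alt grid
instance (grid : List (List Int)) (out : List (List Int)) : Decidable (Spec_transform grid out) := by unfold Spec_transform; infer_instance

-- ===== CLAIM (what is proved, stated in full; the proofs are below) =====
def Claim_equal_transform : Prop := ∀ (grid : List (List Int)), Dom_transform grid → Pre_transform grid → Spec_transform grid (transform grid)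

-- ===== LEMMAS AND PROOFS =====

theorem a1 (W : Nat → Bool) : ∀ (m : Nat) (row : List Int), m ≤ row.length →
    (List.range m).foldl (fun row c => if W c then row.set c 2 else row) row
    = ((List.range m).map (fun c => if W c then (2:Int) else row.getD c 0)) ++ row.drop m := by
  intro m
  induction m with
  | zero => simp
  | succ m ih =>
    intro row hm
    rw [List.range_succ, List.foldl_append, List.map_append, ih row (by omega)]
    simp only [List.foldl_cons, List.foldl_nil, List.map_cons, List.map_nil]
    have hlen : ((List.range m).map (fun c => if W c then (2:Int) else row.getD c 0)).length = m := by simp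
    obtain ⟨x, xs, hx⟩ : ∃ x xs, row.drop m = x :: xs := by
      cases h : row.drop m with
      | nil => exfalso; have := List.length_drop (l := row) (i := m); rw [h] at this; simp at this; omega
      | cons x xs => exact ⟨x, xs, rfl⟩
    have hdrop : row.drop (m+1) = xs := by
      have h1 : row.drop (m+1) = (row.drop m).drop 1 := by rw [List.drop_drop]
      rw [h1, hx]; rfl
    have hgetD : row.getD m 0 = x := by
      have h0 : (row.drop m).getD 0 0 = x := by rw [hx]; rfl
      rw [← h0]; simp [List.getD, List.getElem?_drop]
    by_cases hW : W m
    · rw [hx, List.set_append_right _ _ (by omega)]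
      simp [hlen, hdrop, hW]
    · rw [hx]
      simp only [hW]
      simp [hdrop]
      simpa [List.getD] using hgetD.symm

theorem a2 (W : Nat → Bool) (r : Nat) : ∀ (m : Nat) (t : List (List Int)), r < t.length →
    (List.range m).foldl (fun t c => if W c then t.set r ((t.getD r []).set c 2) else t) t
    = t.set r ((List.range m).foldl (fun row c => if W c then row.set c 2 else row) (t.getD r [])) := by
  intro m
  induction m with
  | zero => intro t ht; simp [List.getD, List.getElem?_eq_getElem ht]
  | succ m ih =>
    intro t ht
    rw [List.range_succ, List.foldl_append, List.foldl_append, ih t ht]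
    simp only [List.foldl_cons, List.foldl_nil, List.getD]
    have hget : ∀ L : List Int, (t.set r L)[r]?.getD [] = L := fun L => by simp [ht]
    by_cases hW : W m
    · rw [if_pos hW, if_pos hW, hget, List.set_set]
    · rw [if_neg hW, if_neg hW]

theorem a23 (W : Nat → Nat → Bool) (rows cols : Nat) :
    (List.range rows).foldl (fun t r => (List.range cols).foldl
        (fun t c => if W r c then t.set r ((t.getD r []).set c 2) else t) t)
      (List.replicate rows (List.replicate cols (0:Int)))
    = (List.range rows).map (fun r => (List.range cols).map (fun c => if W r c then (2:Int) else 0)) := by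
  suffices h : ∀ m, m ≤ rows →
      (List.range m).foldl (fun t r => (List.range cols).foldl
          (fun t c => if W r c then t.set r ((t.getD r []).set c 2) else t) t)
        (List.replicate rows (List.replicate cols (0:Int)))
      = (List.range m).map (fun r => (List.range cols).map (fun c => if W r c then (2:Int) else 0))
          ++ List.replicate (rows - m) (List.replicate cols (0:Int)) by
    have := h rows le_rfl
    simpa using this
  intro m
  induction m with
  | zero => simp
  | succ m ih =>
    intro hm
    rw [List.range_succ, List.foldl_append, List.map_append, ih (by omega)]
    simp only [List.foldl_cons, List.foldl_nil, List.map_cons, List.map_nil]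
    set P := (List.range m).map (fun r => (List.range cols).map (fun c => if W r c then (2:Int) else 0)) with hP
    have hPlen : P.length = m := by simp [hP]
    have hrep : List.replicate (rows - m) (List.replicate cols (0:Int))
        = List.replicate cols (0:Int) :: List.replicate (rows - (m+1)) (List.replicate cols (0:Int)) := by
      rw [show rows - m = (rows - (m+1)) + 1 by omega]; rfl
    rw [hrep]
    have htlen : (P ++ List.replicate cols (0:Int) :: List.replicate (rows - (m+1)) (List.replicate cols (0:Int))).length = rows := by
      simp [hPlen]; omega
    rw [a2 (W m) m cols _ (by omega)]
    have hget : (P ++ List.replicate cols (0:Int) :: List.replicate (rows - (m+1)) (List.replicate cols (0:Int))).getD m []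
        = List.replicate cols (0:Int) := by
      simp [List.getD, List.getElem?_append_right, hPlen]
    rw [hget, a1 (W m) cols (List.replicate cols (0:Int)) (by simp)]
    have hzero : (List.range cols).map (fun c => if W m c then (2:Int) else (List.replicate cols (0:Int)).getD c 0)
        = (List.range cols).map (fun c => if W m c then (2:Int) else 0) := by
      apply List.map_congr_left
      intro c hc
      simp only [List.getD, List.getElem?_replicate]
      split <;> [skip; split] <;> simp_all
    rw [List.drop_replicate]
    simp only [Nat.sub_self, List.replicate_zero, List.append_nil, hzero]
    rw [List.set_append_right _ _ (by omega)]
    simp [hPlen]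

def pvW (grid : List (List Int)) (rows cols : Int) (r c : Nat) : Bool :=
  (pvGet2 grid r c == 1) ||
  ((pvGet2 grid r c == 0) &&
    ((decide (0 < (r:Int)) && (pvGet2 grid ((r:Int)-1) c == 1)) ||
     (decide ((r:Int) < rows - 1) && (pvGet2 grid ((r:Int)+1) c == 1)) ||
     (decide (0 < (c:Int)) && (pvGet2 grid r ((c:Int)-1) == 1)) ||
     (decide ((c:Int) < cols - 1) && (pvGet2 grid r ((c:Int)+1) == 1))))

theorem rowEq (R : List Int) (cols : Nat) (up down : List Bool) (W : Nat → Bool)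
    (hcols : cols ≤ R.length)
    (hup : up.length = cols) (hdown : down.length = cols)
    (hW : ∀ (c : Nat) (hc : c < cols), W c =
      ((R[c]'(by omega) == 1) || ((R[c]'(by omega) == 0) &&
        (((up[c] || down[c])
          || (false :: ((R.take cols).map (fun v => v == (1:Int))).dropLast)[c]'(by simp; omega))
          || (((R.take cols).map (fun v => v == (1:Int))).tail ++ [false])[c]'(by simp; omega))))) :
    (((R.take cols).map (fun v => v == (1:Int))).zip (R.zip
      (((((((up.zip down).map (fun p => p.1 || p.2)).zip
          (false :: ((R.take cols).map (fun v => v == (1:Int))).dropLast)).map (fun p => p.1 || p.2)).zip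
        (((R.take cols).map (fun v => v == (1:Int))).tail ++ [false])).map (fun p => p.1 || p.2))))).map
      (fun p => if p.1 || (p.2.1 == 0 && p.2.2) then (2:Int) else 0)
    = (List.range cols).map (fun c => if W c then 2 else 0) := by
  apply List.ext_getElem
  · simp [hup, hdown]
    omega
  · intro i h1 h2
    simp only [List.getElem_map, List.getElem_zip, List.getElem_range, List.getElem_take]
    rw [hW i (by simpa using h2)]

theorem A_eq (grid : List (List Int)) :
    transform grid = (List.range grid.length).map (fun r =>
      (List.range (grid.headD []).length).map (fun c =>
        if pvW grid (grid.length : Int) ((grid.headD []).length : Int) r c then (2:Int) else 0)) := by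
  have hc : (if 0 < ((grid.length:Int)) then ((PySem.List.pyGetD grid 0 []).length : Int) else 0)
      = ((grid.headD []).length : Int) := by
    cases grid with
    | nil => simp
    | cons a l => simp [PySem.List.pyGetD_zero]
  simp only [transform, PySem.List.len_eq, hc, PySem.List.pyRange_zero_natCast]
  rw [List.map_map, List.map_const']
  simp only [List.length_map, List.length_range]
  simp only [List.foldl_map, Function.comp_def]
  rw [show List.map (fun (_ : Nat) => List.replicate (grid.headD []).length (0:Int)) (List.range grid.length)
        = List.replicate grid.length (List.replicate (grid.headD []).length (0:Int)) by
      rw [List.map_const']; simp]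
  have hset : ∀ (t : List (List Int)) (r c : Nat), pvSet2 t (r:Int) (c:Int) = t.set r ((t.getD r []).set c 2) := by
    intro t r c
    simp [pvSet2]
  have hstep : ∀ (r c : Nat) (t : List (List Int)),
      (if pvGet2 grid (r:Int) (c:Int) == 1 then pvSet2 t (r:Int) (c:Int)
       else if pvGet2 grid (r:Int) (c:Int) == 0 then
         (if (decide (0 < (r:Int)) && (pvGet2 grid ((r:Int)-1) (c:Int) == 1)) ||
             (decide ((r:Int) < (grid.length:Int) - 1) && (pvGet2 grid ((r:Int)+1) (c:Int) == 1)) ||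
             (decide (0 < (c:Int)) && (pvGet2 grid (r:Int) ((c:Int)-1) == 1)) ||
             (decide ((c:Int) < ((grid.headD []).length:Int) - 1) && (pvGet2 grid (r:Int) ((c:Int)+1) == 1))
          then pvSet2 t (r:Int) (c:Int) else t)
       else t)
      = if pvW grid (grid.length:Int) ((grid.headD []).length:Int) r c then t.set r ((t.getD r []).set c 2) else t := by
    intro r c t
    rw [← hset t r c]
    cases h1 : (pvGet2 grid (r:Int) (c:Int) == 1) <;> cases h2 : (pvGet2 grid (r:Int) (c:Int) == 0) <;>
      simp [pvW, h1, h2]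
  trans (List.range grid.length).foldl (fun t r => (List.range (grid.headD []).length).foldl
      (fun t c => if pvW grid (grid.length:Int) ((grid.headD []).length:Int) r c then t.set r ((t.getD r []).set c 2) else t) t)
      (List.replicate grid.length (List.replicate (grid.headD []).length 0))
  · apply List.foldl_ext
    intro t r _
    apply List.foldl_ext
    intro t c _
    exact hstep r c t
  · exact a23 (pvW grid (grid.length:Int) ((grid.headD []).length:Int)) grid.length (grid.headD []).length

theorem B_eq (grid : List (List Int))
    (hpre : ∀ row ∈ grid, (grid.headD []).length ≤ row.length) :
    transform_alt grid = (List.range grid.length).map (fun r =>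
      (List.range (grid.headD []).length).map (fun c =>
        if pvW grid (grid.length : Int) ((grid.headD []).length : Int) r c then (2:Int) else 0)) := by
  have hc : (if 0 < ((grid.length:Int)) then ((PySem.List.pyGetD grid 0 []).length : Int) else 0)
      = ((grid.headD []).length : Int) := by
    cases grid with
    | nil => simp
    | cons a l => simp [PySem.List.pyGetD_zero]
  simp only [transform_alt, PySem.List.len_eq, hc, PySem.List.pyRange_zero_natCast,
    PySem.List.slice_to_natCast, Int.toNat_natCast, List.foldl_map]
  rw [PySem.List.foldl_append_singleton_eq_map, List.nil_append]
  apply List.map_congr_left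
  intro r hr
  rw [List.mem_range] at hr
  have hmem : ∀ (i : Nat) (hi : i < grid.length), (grid.headD []).length ≤ grid[i].length :=
    fun i hi => hpre _ (List.getElem_mem hi)
  have hrowmap : ∀ (i : Nat) (hi : i < grid.length),
      PySem.List.pyGetD (grid.map (fun row =>
        (row.take (grid.headD []).length).map (fun v => v == (1:Int)))) (i : Int) []
      = (grid[i].take (grid.headD []).length).map (fun v => v == (1:Int)) := by
    intro i hi
    simp [List.getD, List.getElem?_map, List.getElem?_eq_getElem hi]
  have hgrow : PySem.List.pyGetD grid (r : Int) [] = grid[r] := by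
    simp [List.getD, List.getElem?_eq_getElem hr]
  have hget2 : ∀ (i c : Nat) (hi : i < grid.length) (hc : c < grid[i].length),
      pvGet2 grid (i : Int) (c : Int) = grid[i][c] := by
    intro i c hi hc
    simp [pvGet2, List.getD, List.getElem?_eq_getElem hi, List.getElem?_eq_getElem hc]
  rw [hrowmap r hr, hgrow]
  rw [PySem.List.slice_to_neg_one, PySem.List.slice_from_one]
  set cols := (grid.headD []).length with hcolsdef
  have hRge : cols ≤ grid[r].length := hmem r hr
  set R : List Int := grid[r] with hRdef
  have main : ∀ (up down : List Bool) (hup : up.length = cols) (hdown : down.length = cols)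
      (hW : ∀ (c : Nat) (hc : c < cols), pvW grid (grid.length : Int) (cols : Int) r c =
        ((R[c]'(by omega) == 1) || ((R[c]'(by omega) == 0) &&
          (((up[c] || down[c])
            || (false :: ((R.take cols).map (fun v => v == (1:Int))).dropLast)[c]'(by simp; omega))
            || (((R.take cols).map (fun v => v == (1:Int))).tail ++ [false])[c]'(by simp; omega))))),
      (((R.take cols).map (fun v => v == (1:Int))).zip (R.zip
        (((((((up.zip down).map (fun p => p.1 || p.2)).zip
            (false :: ((R.take cols).map (fun v => v == (1:Int))).dropLast)).map (fun p => p.1 || p.2)).zip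
          (((R.take cols).map (fun v => v == (1:Int))).tail ++ [false])).map (fun p => p.1 || p.2))))).map
        (fun p => if p.1 || (p.2.1 == 0 && p.2.2) then (2:Int) else 0)
      = (List.range cols).map (fun c => if pvW grid (grid.length : Int) (cols : Int) r c then (2:Int) else 0) :=
    fun up down hup hdown hW =>
      rowEq R cols up down (fun c => pvW grid (grid.length : Int) (cols : Int) r c) hRge hup hdown hW
  have hA3 : ∀ (c : Nat) (hc : c < cols),
      (decide (0 < (c:Int)) && (pvGet2 grid (r:Int) ((c:Int)-1) == 1))
      = (false :: ((R.take cols).map (fun v => v == (1:Int))).dropLast)[c]'(by simp; omega) := by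
    intro c hc
    cases c with
    | zero => simp
    | succ k =>
      rw [show (((k+1:Nat):Int) - 1) = ((k:Nat):Int) by omega,
          hget2 r k hr (by have := hmem r hr; omega)]
      simp [List.getElem_dropLast, List.getElem_map, List.getElem_take]
      exact Iff.rfl
  have hA4 : ∀ (c : Nat) (hc : c < cols),
      (decide ((c:Int) < (cols:Int) - 1) && (pvGet2 grid (r:Int) ((c:Int)+1) == 1))
      = (((R.take cols).map (fun v => v == (1:Int))).tail ++ [false])[c]'(by simp; omega) := by
    intro c hc
    by_cases hlast : c + 1 < cols
    · rw [show (((c:Nat):Int) + 1) = (((c+1:Nat)):Int) by omega,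
          hget2 r (c+1) hr (by have := hmem r hr; omega)]
      rw [List.getElem_append_left (by simp; omega)]
      simp [List.getElem_tail, List.getElem_map, List.getElem_take, show (c:Int) < (cols:Int) - 1 by omega]
      exact Iff.rfl
    · rw [List.getElem_append_right (by simp; omega)]
      simp [show ¬((c:Int) < (cols:Int) - 1) by omega]
  by_cases h0 : 0 < r <;> by_cases h1 : r + 1 < grid.length
  · rw [if_pos (show (0:Int) < (r:Int) by exact_mod_cast h0),
        if_pos (show (r:Int) + 1 < (grid.length:Int) by exact_mod_cast h1),
        show ((r:Int) - 1) = (((r-1:Nat)):Int) by omega,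
        show ((r:Int) + 1) = (((r+1:Nat)):Int) by omega,
        hrowmap (r-1) (by omega), hrowmap (r+1) h1]
    apply main
    · intro c hc
      simp only [pvW]
      rw [hget2 r c hr (by have := hmem r hr; omega)]
      rw [show ((r:Int) - 1) = (((r-1:Nat)):Int) by omega,
          hget2 (r-1) c (by omega) (by have := hmem (r-1) (by omega); omega),
          show ((r:Int) + 1) = (((r+1:Nat)):Int) by omega,
          hget2 (r+1) c h1 (by have := hmem (r+1) h1; omega)]
      rw [hA3 c hc, hA4 c hc]
      simp [show (0:Int) < (r:Int) by exact_mod_cast h0,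
            show (r:Int) < (grid.length:Int) - 1 by omega,
            List.getElem_map, List.getElem_take, hRdef, h0, h1]
    · have := hmem (r-1) (by omega)
      simp only [List.length_map, List.length_take]
      omega
    · have := hmem (r+1) h1
      simp only [List.length_map, List.length_take]
      omega
  · rw [if_pos (show (0:Int) < (r:Int) by exact_mod_cast h0),
        if_neg (show ¬((r:Int) + 1 < (grid.length:Int)) by exact_mod_cast h1),
        show ((r:Int) - 1) = (((r-1:Nat)):Int) by omega,
        hrowmap (r-1) (by omega)]
    apply main
    · intro c hc
      simp only [pvW]
      rw [hget2 r c hr (by have := hmem r hr; omega)]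
      rw [show ((r:Int) - 1) = (((r-1:Nat)):Int) by omega,
          hget2 (r-1) c (by omega) (by have := hmem (r-1) (by omega); omega)]
      rw [hA3 c hc, hA4 c hc]
      simp [show (0:Int) < (r:Int) by exact_mod_cast h0,
            show ¬((r:Int) < (grid.length:Int) - 1) by omega,
            List.getElem_map, List.getElem_take, hRdef, h0, h1]
    · have := hmem (r-1) (by omega)
      simp only [List.length_map, List.length_take]
      omega
    · simp
  · rw [if_neg (show ¬((0:Int) < (r:Int)) by exact_mod_cast h0),
        if_pos (show (r:Int) + 1 < (grid.length:Int) by exact_mod_cast h1),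
        show ((r:Int) + 1) = (((r+1:Nat)):Int) by omega,
        hrowmap (r+1) h1]
    apply main
    · intro c hc
      simp only [pvW]
      rw [hget2 r c hr (by have := hmem r hr; omega)]
      rw [show ((r:Int) + 1) = (((r+1:Nat)):Int) by omega,
          hget2 (r+1) c h1 (by have := hmem (r+1) h1; omega)]
      rw [hA3 c hc, hA4 c hc]
      simp [show ¬((0:Int) < (r:Int)) by exact_mod_cast h0,
            show (r:Int) < (grid.length:Int) - 1 by omega,
            List.getElem_map, List.getElem_take, hRdef, h0, h1]
    · simp
    · have := hmem (r+1) h1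
      simp only [List.length_map, List.length_take]
      omega
  · rw [if_neg (show ¬((0:Int) < (r:Int)) by exact_mod_cast h0),
        if_neg (show ¬((r:Int) + 1 < (grid.length:Int)) by exact_mod_cast h1)]
    apply main
    · intro c hc
      simp only [pvW]
      rw [hget2 r c hr (by have := hmem r hr; omega)]
      rw [hA3 c hc, hA4 c hc]
      simp [show ¬((0:Int) < (r:Int)) by exact_mod_cast h0,
            show ¬((r:Int) < (grid.length:Int) - 1) by omega,
            List.getElem_map, List.getElem_take, hRdef, h0, h1]
    · simp
    · simp

-- ===== VERDICT (by name: the statement is the Claim_ definition above) =====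
theorem transform_spec : Claim_equal_transform := by
  unfold Claim_equal_transform
  intro grid _ hpre
  unfold Spec_transform
  exact (A_eq grid).trans (B_eq grid hpre).symm
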